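-- pv_equiv track=rewrite | github.com/KatarinaVdP/master2022 | Isaksen and Svagaard/simulering/utils.py | days_in_weekend
-- ===== SOURCE A (Python) =====
-- def days_in_weekend(number_of_weeks):
--
--     weekend = []
--
--     for i in range(number_of_weeks):
--         sat = (6 +7*i)
--         sun = (7 + 7*i)
--         weekend.append(sat)
--         weekend.append(sun)
--
--
--     return weekend
-- ===== SOURCE B (Python) =====
-- def days_in_weekend(number_of_weeks):
--     # Flat scan over every day number; keep Saturdays (d % 7 == 6) and Sundays (d % 7 == 0).
--     return [d for d in range(1, 7 * number_of_weeks + 1) if d % 7 == 6 or d % 7 == 0]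
-- ===== Notes on version B (the rewrite author's own statement) =====
-- stated objective: alternative
-- what changed: Replaces the per-week loop that appends two offset-computed values with a single flat scan over every day number of the period, keeping exactly those whose residue modulo seven marks a Saturday or Sunday.
import Mathlib
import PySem

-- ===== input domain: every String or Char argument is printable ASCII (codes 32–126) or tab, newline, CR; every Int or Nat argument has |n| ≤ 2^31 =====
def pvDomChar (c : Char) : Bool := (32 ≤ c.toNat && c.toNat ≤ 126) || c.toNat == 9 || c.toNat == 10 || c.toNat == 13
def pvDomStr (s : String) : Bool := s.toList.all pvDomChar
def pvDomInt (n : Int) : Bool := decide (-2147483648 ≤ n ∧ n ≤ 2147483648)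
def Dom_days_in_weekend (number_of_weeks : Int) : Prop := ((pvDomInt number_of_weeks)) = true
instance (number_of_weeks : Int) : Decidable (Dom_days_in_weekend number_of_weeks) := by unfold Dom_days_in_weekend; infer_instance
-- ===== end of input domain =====

-- B replaces A's per-week loop (two offset appends per week) with one flat filtered scan
-- over all day numbers 1..7n (alternative decomposition; same cost).

-- ===== PORT A =====
def days_in_weekend (number_of_weeks : Int) : List Int :=
  (PySem.List.pyRange 0 number_of_weeks 1).foldl
    (fun weekend i =>
      let sat := 6 + 7 * i
      let sun := 7 + 7 * i
      (weekend ++ [sat]) ++ [sun]) []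

-- ===== PORT B =====
def days_in_weekend_alt (number_of_weeks : Int) : List Int :=
  (PySem.List.pyRange 1 (7 * number_of_weeks + 1) 1).filter
    (fun d => PySem.Int.mod d 7 == 6 || PySem.Int.mod d 7 == 0)

-- ===== PRECONDITION & SPEC =====
def Spec_days_in_weekend (number_of_weeks : Int) (out : List Int) : Prop := out = days_in_weekend_alt number_of_weeks
instance (number_of_weeks : Int) (out : List Int) : Decidable (Spec_days_in_weekend number_of_weeks out) := by unfold Spec_days_in_weekend; infer_instance

-- ===== CLAIM (what is proved, stated in full; the proofs are below) =====
def Claim_equal_days_in_weekend : Prop := ∀ (number_of_weeks : Int), Dom_days_in_weekend number_of_weeks → Spec_days_in_weekend number_of_weeks (days_in_weekend number_of_weeks)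

-- ===== LEMMAS AND PROOFS =====

-- One week's block of seven consecutive days filters down to its Saturday and Sunday.
lemma pv_block (k : Int) :
    (PySem.List.pyRange (7 * k + 1) (7 * k + 8) 1).filter
      (fun d => PySem.Int.mod d 7 == 6 || PySem.Int.mod d 7 == 0)
      = [7 * k + 6, 7 * k + 7] := by
  rw [PySem.List.pyRange_one]
  norm_num [List.range_succ, List.filter]
  simp only [show Int.toNat 7 = 7 from rfl, List.range_succ]
  norm_num [List.filter]
  have h1 : (7 * k + 1 + 1) % 7 = 2 := by omega
  have h2 : (7 * k + 1 + 2) % 7 = 3 := by omega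
  have h3 : (7 * k + 1 + 3) % 7 = 4 := by omega
  have h4 : (7 * k + 1 + 4) % 7 = 5 := by omega
  have h5 : (7 * k + 1 + 5) % 7 = 6 := by omega
  have h6 : (7 * k + 1 + 6) % 7 = 0 := by omega
  rw [h1, h2, h3, h4, h5, h6]
  simp
  constructor <;> ring

-- Equality of the two ports for every natural number of weeks, by induction on the week count.
lemma pv_key (k : Nat) : days_in_weekend (k : Int) = days_in_weekend_alt (k : Int) := by
  induction k with
  | zero => decide
  | succ m ih =>
    unfold days_in_weekend days_in_weekend_alt at *
    have hA : ((m + 1 : Nat) : Int) = (m : Int) + 1 := by push_cast; ring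
    rw [hA, PySem.List.pyRange_one_succ_right (by omega)]
    have hB : 7 * ((m : Int) + 1) + 1 = (7 * (m : Int) + 1) + 7 := by ring
    rw [hB, PySem.List.pyRange_one_append 1 (7 * (m : Int) + 1) (7 * (m : Int) + 1 + 7)
      (by omega) (by omega)]
    rw [List.foldl_append, List.filter_append, ih]
    have h8 : (7 * (m : Int) + 1) + 7 = 7 * (m : Int) + 8 := by ring
    rw [h8, pv_block]
    simp
    constructor <;> ring

-- ===== VERDICT (by name: the statement is the Claim_ definition above) =====
theorem days_in_weekend_spec : Claim_equal_days_in_weekend := by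
  intro n _
  unfold Spec_days_in_weekend
  by_cases h : n ≤ 0
  · unfold days_in_weekend days_in_weekend_alt
    rw [PySem.List.pyRange_one_eq_nil h, PySem.List.pyRange_one_eq_nil (by omega)]
    rfl
  · obtain ⟨k, rfl⟩ := Int.eq_ofNat_of_zero_le (by omega : (0:Int) ≤ n)
    exact pv_key k
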